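-- pv_equiv track=rewrite | github.com/PodYapolskiy/algorithms | Custom/yandex2.py | f
-- ===== SOURCE A (Python) =====
-- def f(arr: list[str]) -> list[str]:
--     """
--     Time:  O(n)
--     Space: O(n)
--     """
--     moves = {
--         "R": lambda pos: (pos[0] + 1, pos[1]),
--         "D": lambda pos: (pos[0], pos[1] - 1),
--         "L": lambda pos: (pos[0] - 1, pos[1]),
--         "U": lambda pos: (pos[0], pos[1] + 1),
--     }
--
--     i = 0
--     pos = (0, 0)
--     vector = [pos]
--     visited = set([pos])
--     result = []
--     while i < len(arr):
--         move = arr[i]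
--         pos = moves[move](pos)
--
--         if pos in visited:
--             while vector and pos != vector[-1]:
--                 visited.remove(vector[-1])
--                 vector.pop()
--                 result.pop()
--         else:
--             visited.add(pos)
--             vector.append(pos)
--             result.append(move)
--
--         i += 1
--
--     return result
-- ===== SOURCE B (Python) =====
-- def f(arr: list[str]) -> list[str]:
--     """Last-exit decomposition of the loop-erased path: no stack, no truncation.
--     Build the full position sequence, index each position's LAST occurrence, then
--     jump from each kept position directly past its last occurrence; finally map
--     consecutive position deltas back to letters."""
--     delta = {"R": (1, 0), "D": (0, -1), "L": (-1, 0), "U": (0, 1)}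
--     letter = {d: m for m, d in delta.items()}
--     pos = [(0, 0)]
--     for m in arr:
--         dx, dy = delta[m]
--         x, y = pos[-1]
--         pos.append((x + dx, y + dy))
--     last = {p: i for i, p in enumerate(pos)}
--     path = [pos[0]]
--     i = last[pos[0]] + 1
--     while i < len(pos):
--         path.append(pos[i])
--         i = last[pos[i]] + 1
--     return [letter[(x2 - x1, y2 - y1)]
--             for (x1, y1), (x2, y2) in zip(path, path[1:])]
-- ===== Notes on version B (the rewrite author's own statement) =====
-- stated objective: alternative
-- what changed: B replaces A's stack-with-truncation simulation by the last-exit decomposition: it precomputes the whole position sequence and a last-occurrence index, then jumps from each kept position directly past its last occurrence, reconstructing letters from consecutive deltas; no stack, no popping, no visited-set maintenance.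
import Mathlib
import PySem

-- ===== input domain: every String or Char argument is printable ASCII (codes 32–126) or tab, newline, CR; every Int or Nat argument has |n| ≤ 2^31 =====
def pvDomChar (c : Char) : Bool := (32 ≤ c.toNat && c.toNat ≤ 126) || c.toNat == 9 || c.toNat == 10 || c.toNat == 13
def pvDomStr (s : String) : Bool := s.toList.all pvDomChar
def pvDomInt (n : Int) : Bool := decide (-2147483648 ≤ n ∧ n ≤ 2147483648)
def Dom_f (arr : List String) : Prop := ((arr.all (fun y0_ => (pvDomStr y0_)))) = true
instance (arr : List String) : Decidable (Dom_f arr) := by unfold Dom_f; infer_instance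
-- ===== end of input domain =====

-- B is the last-exit decomposition of the loop-erased walk: it precomputes all
-- positions and a last-occurrence index and jumps past each kept position's last
-- occurrence — no stack, no truncation; objective: alternative algorithm.

-- ===== PORT A =====
-- the `moves` dict of lambdas; none = KeyError (excluded by Pre_f)
def fMoves (m : String) : Option ((Int × Int) → (Int × Int)) :=
  if m = "R" then some (fun p => (p.1 + 1, p.2))
  else if m = "D" then some (fun p => (p.1, p.2 - 1))
  else if m = "L" then some (fun p => (p.1 - 1, p.2))
  else if m = "U" then some (fun p => (p.1, p.2 + 1))
  else none

-- the inner `while vector and pos != vector[-1]` loop; `vector` and `result` are kept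
-- in REVERSED order (append = cons, pop = tail, [-1] = head).  `visited.remove` is
-- Set.discard (the element is always present there) and `result.pop()` is List.tail.
def fPop (pos : Int × Int) : List (Int × Int) → PySem.Set (Int × Int) → List String →
    List (Int × Int) × PySem.Set (Int × Int) × List String
  | [], vis, res => ([], vis, res)
  | top :: rest, vis, res =>
    if pos = top then (top :: rest, vis, res)
    else fPop pos rest (PySem.Set.discard vis top) res.tail

-- the outer `while i < len(arr)` loop over arr with state (pos, vector, visited, result)
def fLoop : List String → (Int × Int) → List (Int × Int) → PySem.Set (Int × Int) →
    List String → List String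
  | [], _, _, _, res => res.reverse
  | move :: rest, pos0, vec, vis, res =>
    match fMoves move with
    | none => res.reverse      -- KeyError (outside Pre_f)
    | some mv =>
      let pos := mv pos0
      if PySem.Set.contains vis pos then
        let s := fPop pos vec vis res
        fLoop rest pos s.1 s.2.1 s.2.2
      else
        fLoop rest pos (pos :: vec) (PySem.Set.add vis pos) (move :: res)

def f (arr : List String) : List String :=
  fLoop arr (0, 0) [(0, 0)] (PySem.Set.ofList [(0, 0)]) []

-- ===== PORT B =====
-- the `delta` dict; none = KeyError (excluded by Pre_f)
def fAltDelta (m : String) : Option (Int × Int) :=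
  if m = "R" then some (1, 0)
  else if m = "D" then some (0, -1)
  else if m = "L" then some (-1, 0)
  else if m = "U" then some (0, 1)
  else none

-- the `letter` dict
def fAltLetter : PySem.Dict (Int × Int) String :=
  PySem.Dict.ofList [((1, 0), "R"), ((0, -1), "D"), ((-1, 0), "L"), ((0, 1), "U")]

-- one iteration of `for m in arr: pos.append(...)`
def fAltStep (ps : List (Int × Int)) (m : String) : List (Int × Int) :=
  match fAltDelta m with
  | none => ps                 -- KeyError (outside Pre_f)
  | some (dx, dy) =>
    match PySem.List.pyGet? ps (-1) with   -- pos[-1]; the list is never empty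
    | none => ps
    | some (x, y) => ps ++ [(x + dx, y + dy)]

-- the `while i < len(pos)` jump loop; fuel = len(pos) (i strictly increases each
-- iteration, starting at ≥ 1, so the fuel is never exhausted on admitted inputs)
def fAltJump (pos : List (Int × Int)) (last : PySem.Dict (Int × Int) Int) :
    Nat → Int → List (Int × Int) → List (Int × Int)
  | 0, _, path => path
  | fuel + 1, i, path =>
    if i < (pos.length : Int) then
      match PySem.List.pyGet? pos i with
      | none => path
      | some p => fAltJump pos last fuel (PySem.Dict.getD last p 0 + 1) (path ++ [p])
    else path

def f_alt (arr : List String) : List String :=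
  let pos := arr.foldl fAltStep [(0, 0)]
  let last := (PySem.List.enumerate pos 0).foldl
    (fun d iv => PySem.Dict.insert d iv.2 iv.1) PySem.Dict.empty
  match PySem.List.pyGet? pos 0 with
  | none => []                 -- unreachable: pos is never empty
  | some p0 =>
    let path := fAltJump pos last pos.length (PySem.Dict.getD last p0 0 + 1) [p0]
    (path.zip (PySem.List.slice path (some 1) none)).map
      (fun pq => PySem.Dict.getD fAltLetter (pq.2.1 - pq.1.1, pq.2.2 - pq.1.2) "")

-- ===== PRECONDITION & SPEC =====
-- Pre_f: every element is one of the four move letters; on any other string both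
-- programs hit a dict lookup that raises KeyError in Python.
def Pre_f (arr : List String) : Prop :=
  ∀ m ∈ arr, m = "R" ∨ m = "D" ∨ m = "L" ∨ m = "U"
instance (arr : List String) : Decidable (Pre_f arr) := by unfold Pre_f; infer_instance

def pvWitness_f : List String := ["R", "R", "U", "L", "L", "D", "R"]

def Spec_f (arr : List String) (out : List String) : Prop := out = f_alt arr
instance (arr : List String) (out : List String) : Decidable (Spec_f arr out) := by
  unfold Spec_f; infer_instance

-- ===== CLAIM (what is proved, stated in full; the proofs are below) =====
def Claim_equal_f : Prop := ∀ (arr : List String), Dom_f arr → Pre_f arr → Spec_f arr (f arr)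

-- ===== LEMMAS AND PROOFS =====
-- (everything below is proof-side machinery)

-- the position sequence generated by the moves from a start (excluding the start)
def posSeq (p : Int × Int) : List String → List (Int × Int)
  | [] => []
  | m :: ms =>
    match fAltDelta m with
    | none => []
    | some (dx, dy) => (p.1 + dx, p.2 + dy) :: posSeq (p.1 + dx, p.2 + dy) ms

-- chronological loop erasure over the position sequence, forward stack (bottom first)
def chronoRun : List (Int × Int) → List (Int × Int) → List (Int × Int)
  | [], v => v
  | q :: rest, v =>
    if q ∈ v then chronoRun rest (v.takeWhile (fun x => x != q) ++ [q])
    else chronoRun rest (v ++ [q])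

-- the suffix strictly after the LAST occurrence of p
def afterLast (p : Int × Int) : List (Int × Int) → List (Int × Int)
  | [] => []
  | q :: t => if q = p ∧ p ∉ t then t else afterLast p t

lemma afterLast_split (p : Int × Int) (l : List (Int × Int)) (h : p ∈ l) :
    ∃ c, l = c ++ p :: afterLast p l ∧ p ∉ afterLast p l := by
  induction l with
  | nil => simp at h
  | cons q t ih =>
    by_cases hc : q = p ∧ p ∉ t
    · exact ⟨[], by simp [afterLast, hc, hc.1], by simp [afterLast, hc, hc.2]⟩
    · have hpt : p ∈ t := by
        rcases List.mem_cons.mp h with h1 | h1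
        · by_cases h2 : p ∈ t
          · exact h2
          · exact absurd ⟨h1.symm, h2⟩ hc
        · exact h1
      obtain ⟨c, hceq, hnot⟩ := ih hpt
      have hA : afterLast p (q :: t) = afterLast p t := by simp [afterLast, hc]
      exact ⟨q :: c, by rw [hA]; simpa using hceq, hA ▸ hnot⟩

lemma afterLast_length_lt (p : Int × Int) (l : List (Int × Int)) (h : p ∈ l) :
    (afterLast p l).length < l.length := by
  obtain ⟨c, hceq, _⟩ := afterLast_split p l h
  have hlen := congrArg List.length hceq
  simp at hlen
  omega

lemma afterLast_append (p : Int × Int) (x d : List (Int × Int)) (hd : p ∉ d) :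
    afterLast p (x ++ p :: d) = d := by
  induction x with
  | nil => simp [afterLast, hd]
  | cons y x ih =>
    have : ¬ (y = p ∧ p ∉ (x ++ p :: d)) := by
      intro ⟨_, h2⟩; exact h2 (by simp)
    simp only [List.cons_append, afterLast, this, if_false]
    exact ih

-- last-exit decomposition of the loop-erased walk
def lastExit (p : Int × Int) (rest : List (Int × Int)) : List (Int × Int) :=
  if h : p ∈ rest then lastExit p (afterLast p rest)
  else
    match rest with
    | [] => [p]
    | q :: t => p :: lastExit q t
termination_by rest.length
decreasing_by
  · exact afterLast_length_lt p rest h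
  · simp

lemma lastExit_mem (p : Int × Int) (rest : List (Int × Int)) (h : p ∈ rest) :
    lastExit p rest = lastExit p (afterLast p rest) := by
  rw [lastExit]; simp [h]

lemma lastExit_nil (p : Int × Int) : lastExit p [] = [p] := by
  rw [lastExit]; simp

lemma lastExit_cons (p q : Int × Int) (t : List (Int × Int)) (h : p ∉ q :: t) :
    lastExit p (q :: t) = p :: lastExit q t := by
  rw [lastExit]; simp [h]

lemma lastExit_head (p : Int × Int) (rest : List (Int × Int)) (h : p ∉ rest) :
    ∃ r, lastExit p rest = p :: r := by
  cases rest with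
  | nil => exact ⟨[], lastExit_nil p⟩
  | cons q t => exact ⟨lastExit q t, lastExit_cons p q t h⟩

lemma lastExit_dropPast (p : Int × Int) (x d : List (Int × Int)) (hd : p ∉ d) :
    lastExit p (x ++ p :: d) = lastExit p d := by
  rw [lastExit_mem p _ (by simp), afterLast_append p x d hd]

-- a bottom element not revisited stays at the bottom and is untouched
lemma chronoRun_cons_bottom (rest : List (Int × Int)) :
    ∀ (v : List (Int × Int)) (p0 : Int × Int), p0 ∉ rest → p0 ∉ v →
    chronoRun rest (p0 :: v) = p0 :: chronoRun rest v := by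
  induction rest with
  | nil => intro v p0 _ _; simp [chronoRun]
  | cons q rest ih =>
    intro v p0 hr hv
    have hq : q ≠ p0 := fun h => hr (h ▸ List.mem_cons_self)
    have hr' : p0 ∉ rest := fun h => hr (List.mem_cons_of_mem _ h)
    by_cases hm : q ∈ v
    · have hm' : q ∈ p0 :: v := List.mem_cons_of_mem _ hm
      have htw : (p0 :: v).takeWhile (fun x => x != q) =
          p0 :: v.takeWhile (fun x => x != q) := by
        simp [List.takeWhile_cons, bne_iff_ne, hq.symm]
      have hnot : p0 ∉ v.takeWhile (fun x => x != q) ++ [q] := by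
        intro h
        rcases List.mem_append.mp h with h | h
        · exact hv ((List.takeWhile_sublist _).subset h)
        · simp at h; exact hq h.symm
      simp only [chronoRun, hm, hm', if_true, htw, List.cons_append]
      exact ih _ p0 hr' hnot
    · have hm' : q ∉ p0 :: v := by simp only [List.mem_cons, not_or]; exact ⟨hq, hm⟩
      have hnot : p0 ∉ v ++ [q] := by
        intro h
        rcases List.mem_append.mp h with h | h
        · exact hv h
        · simp at h; exact hq h.symm
      simp only [chronoRun, hm, hm', if_false, List.cons_append]
      exact ih _ p0 hr' hnot

-- up to the LAST occurrence of the bottom element everything is forgotten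
lemma chronoRun_reset (p0 : Int × Int) (w : List (Int × Int)) :
    ∀ (c v : List (Int × Int)), p0 ∉ v →
    chronoRun (c ++ p0 :: w) (p0 :: v) = chronoRun w [p0] := by
  intro c
  induction c with
  | nil =>
    intro v hv
    have htw : (p0 :: v).takeWhile (fun x => x != p0) = [] := by
      simp [List.takeWhile_cons]
    simp [chronoRun, htw]
  | cons q c ih =>
    intro v hv
    by_cases hqp : q = p0
    · subst hqp
      have htw : (q :: v).takeWhile (fun x => x != q) = [] := by
        simp [List.takeWhile_cons]
      simp only [List.cons_append, chronoRun, List.mem_cons, if_pos (Or.inl rfl), htw,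
        List.nil_append]
      exact ih [] (by simp)
    · by_cases hm : q ∈ v
      · have hm' : q ∈ p0 :: v := List.mem_cons_of_mem _ hm
        have htw : (p0 :: v).takeWhile (fun x => x != q) =
            p0 :: v.takeWhile (fun x => x != q) := by
          simp [List.takeWhile_cons, bne_iff_ne, (Ne.symm hqp : p0 ≠ q)]
        have hnot : p0 ∉ v.takeWhile (fun x => x != q) ++ [q] := by
          intro h
          rcases List.mem_append.mp h with h | h
          · exact hv ((List.takeWhile_sublist _).subset h)
          · simp at h; exact hqp h.symm
        simp only [List.cons_append, chronoRun, hm', if_true, htw]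
        exact ih _ hnot
      · have hm' : q ∉ p0 :: v := by simp [hqp, hm]
        have hnot : p0 ∉ v ++ [q] := by
          intro h
          rcases List.mem_append.mp h with h | h
          · exact hv h
          · simp at h; exact hqp h.symm
        simp only [List.cons_append, chronoRun, hm', if_false, List.cons_append]
        exact ih _ hnot

-- the heart: chronological erasure = last-exit decomposition
lemma chronoRun_eq_lastExit (n : Nat) :
    ∀ (rest : List (Int × Int)), rest.length ≤ n → ∀ p0,
    chronoRun rest [p0] = lastExit p0 rest := by
  induction n with
  | zero =>
    intro rest hlen p0
    have : rest = [] := List.eq_nil_of_length_eq_zero (by omega)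
    subst this
    simp [chronoRun, lastExit_nil]
  | succ n ih =>
    intro rest hlen p0
    by_cases hp : p0 ∈ rest
    · obtain ⟨c, hceq, hnot⟩ := afterLast_split p0 rest hp
      have hlt := afterLast_length_lt p0 rest hp
      calc chronoRun rest [p0] = chronoRun (c ++ p0 :: afterLast p0 rest) ((p0 : Int × Int) :: []) := by
            rw [← hceq]
      _ = chronoRun (afterLast p0 rest) [p0] := chronoRun_reset p0 _ c [] (by simp)
      _ = lastExit p0 (afterLast p0 rest) := ih _ (by omega) p0
      _ = lastExit p0 rest := (lastExit_mem p0 rest hp).symm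
    · cases rest with
      | nil => simp [chronoRun, lastExit_nil]
      | cons q t =>
        have hq : q ≠ p0 := fun h => hp (h ▸ List.mem_cons_self)
        have hpt : p0 ∉ t := fun h => hp (List.mem_cons_of_mem _ h)
        have hm' : q ∉ [p0] := by simp [hq]
        have h1 : chronoRun (q :: t) [p0] = chronoRun t (p0 :: [q]) := by
          simp [chronoRun, hm']
        rw [h1, chronoRun_cons_bottom t [q] p0 hpt (by simp [hq.symm]),
          ih t (by simpa using hlen) q, lastExit_cons p0 q t hp]

-- B's final reconstruction pass as a function of a position list
def lettersOf (v : List (Int × Int)) : List String :=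
  (v.zip (PySem.List.slice v (some 1) none)).map
    (fun pq => PySem.Dict.getD fAltLetter (pq.2.1 - pq.1.1, pq.2.2 - pq.1.2) "")

lemma lettersOf_eq (v : List (Int × Int)) :
    lettersOf v = (v.zip v.tail).map
      (fun pq => PySem.Dict.getD fAltLetter (pq.2.1 - pq.1.1, pq.2.2 - pq.1.2) "") := by
  have h : PySem.List.slice v (some 1) none = v.drop 1 := by
    simpa using PySem.List.slice_from v (a := 1) (by norm_num)
  simp [lettersOf, h]

lemma zip_tail_append (u w : List (Int × Int)) (p : Int × Int) (h : u.getLast? = some p) :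
    (u ++ w).zip (u ++ w).tail = u.zip u.tail ++ (p :: w).zip w := by
  induction u with
  | nil => simp at h
  | cons x u ih =>
    cases u with
    | nil =>
      simp at h
      subst h
      cases w <;> simp
    | cons y u =>
      have h' : (y :: u).getLast? = some p := by
        rw [List.getLast?_cons_cons] at h; exact h
      have := ih h'
      simp only [List.cons_append, List.zip_cons_cons, List.tail_cons] at *
      rw [this]

lemma lettersOf_append (u w : List (Int × Int)) (p : Int × Int) (h : u.getLast? = some p) :
    lettersOf (u ++ w) = lettersOf u ++ lettersOf (p :: w) := by
  rw [lettersOf_eq, lettersOf_eq, lettersOf_eq, zip_tail_append u w p h, List.map_append]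
  simp

lemma length_lettersOf_cons (p : Int × Int) (w : List (Int × Int)) :
    (lettersOf (p :: w)).length = w.length := by
  rw [lettersOf_eq]
  simp

-- for each admitted letter: A's lambda, B's delta and B's letter table cohere
lemma moveAgree (m : String) (h : m = "R" ∨ m = "D" ∨ m = "L" ∨ m = "U") :
    ∃ dx dy mv, fMoves m = some mv ∧ (∀ q : Int × Int, mv q = (q.1 + dx, q.2 + dy)) ∧
      fAltDelta m = some (dx, dy) ∧ PySem.Dict.getD fAltLetter (dx, dy) "" = m := by
  rcases h with h | h | h | h <;> subst h
  · exact ⟨1, 0, _, rfl, fun q => by simp, rfl, by decide⟩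
  · exact ⟨0, -1, _, rfl, fun q => by simp [sub_eq_add_neg], rfl, by decide⟩
  · exact ⟨-1, 0, _, rfl, fun q => by simp [sub_eq_add_neg], rfl, by decide⟩
  · exact ⟨0, 1, _, rfl, fun q => by simp, rfl, by decide⟩

lemma pyGet_neg_one (v : List (Int × Int)) (p : Int × Int) (h : v.getLast? = some p) :
    PySem.List.pyGet? v (-1) = some p := by
  have hv : v ≠ [] := by intro hnil; subst hnil; simp at h
  have hlen : (1 : Int) ≤ (v.length : Int) := by
    exact_mod_cast List.length_pos_iff.mpr hv
  simp only [PySem.List.pyGet?, PySem.List.pyIdx?]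
  rw [if_neg (by omega), if_pos (by omega)]
  rw [List.getLast?_eq_getElem?] at h
  simpa using h

-- folding `visited.remove(…)` over a list of elements filters the set's list
lemma foldl_discard_eq (c s : List (Int × Int)) :
    c.foldl PySem.Set.discard s = s.filter (fun y => decide (y ∉ c)) := by
  induction c generalizing s with
  | nil => simp
  | cons x c ih =>
    rw [List.foldl_cons, ih]
    simp only [PySem.Set.discard, List.filter_filter]
    apply List.filter_congr
    intro y _
    by_cases h1 : y = x <;> by_cases h2 : y ∈ c <;> simp [h1, h2]

-- the inner pop loop pops exactly the part above the first occurrence of pos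
lemma fPop_eq (pos : Int × Int) (c : List (Int × Int)) :
    ∀ (w : List (Int × Int)) (vis : PySem.Set (Int × Int)) (res : List String),
    (∀ q ∈ c, q ≠ pos) → w.head? = some pos →
    fPop pos (c ++ w) vis res = (w, c.foldl PySem.Set.discard vis, res.drop c.length) := by
  induction c with
  | nil =>
    intro w vis res _ hw
    cases w with
    | nil => simp at hw
    | cons x w =>
      simp at hw
      simp [fPop, hw]
  | cons x c ih =>
    intro w vis res hc hw
    have hx : pos ≠ x := fun h => hc x List.mem_cons_self h.symm
    rw [List.cons_append]
    show fPop pos (x :: (c ++ w)) vis res = _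
    rw [fPop]
    simp only [hx, if_false]
    rw [ih w _ _ (fun q hq => hc q (List.mem_cons_of_mem _ hq)) hw]
    simp

lemma takeWhile_bne_append (pos : Int × Int) (a b : List (Int × Int)) (ha : pos ∉ a) :
    (a ++ pos :: b).takeWhile (fun x => x != pos) = a := by
  induction a with
  | nil => simp [List.takeWhile_cons]
  | cons x a ih =>
    have hx : x ≠ pos := fun h => ha (h ▸ List.mem_cons_self)
    simp only [List.cons_append, List.takeWhile_cons, bne_iff_ne, ne_eq, hx,
      not_false_eq_true, decide_true, if_true]
    rw [ih (fun h => ha (List.mem_cons_of_mem _ h))]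

-- the main simulation invariant: A's loop computes the letters of the
-- chronologically loop-erased position sequence
lemma mainInv (rest : List String) :
    ∀ (v : List (Int × Int)) (p : Int × Int),
    (∀ m ∈ rest, m = "R" ∨ m = "D" ∨ m = "L" ∨ m = "U") →
    v.Nodup → v.getLast? = some p →
    fLoop rest p v.reverse v (lettersOf v).reverse
      = lettersOf (chronoRun (posSeq p rest) v) := by
  induction rest with
  | nil =>
    intro v p _ _ _
    simp [fLoop, posSeq, chronoRun]
  | cons m rest ih =>
    intro v pp hpre hnd hlast
    obtain ⟨dx, dy, mv, hmv, hmvq, hdelta, hletter⟩ :=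
      moveAgree m (hpre m List.mem_cons_self)
    have hpre' : ∀ m' ∈ rest, m' = "R" ∨ m' = "D" ∨ m' = "L" ∨ m' = "U" :=
      fun m' hm' => hpre m' (List.mem_cons_of_mem _ hm')
    obtain ⟨p1, p2⟩ := pp
    set pos : Int × Int := (p1 + dx, p2 + dy) with hpos
    have hmv1 : mv (p1, p2) = pos := by rw [hmvq (p1, p2)]
    have hps : posSeq (p1, p2) (m :: rest) = pos :: posSeq pos rest := by
      rw [hpos]
      simp [posSeq, hdelta]
    rw [hps]
    by_cases hmem : pos ∈ v
    · -- revisit: A pops, the erasure truncates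
      have hsc : PySem.Set.contains v pos = true := by simp [hmem]
      have hA : fLoop (m :: rest) (p1, p2) v.reverse v (lettersOf v).reverse
          = fLoop rest pos (fPop pos v.reverse v (lettersOf v).reverse).1
              (fPop pos v.reverse v (lettersOf v).reverse).2.1
              (fPop pos v.reverse v (lettersOf v).reverse).2.2 := by
        rw [fLoop, hmv]
        simp only [hmv1, hsc, if_true]
      obtain ⟨a, b, hveq⟩ := List.append_of_mem hmem
      subst hveq
      have hnd' := hnd
      rw [List.nodup_append] at hnd'
      obtain ⟨hnda', hndcb, hdisj'⟩ := hnd'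
      have hnda : pos ∉ a := fun ha => hdisj' pos ha pos List.mem_cons_self rfl
      have hndb : pos ∉ b := (List.nodup_cons.mp hndcb).1
      have hdisj : ∀ y ∈ a, y ∉ b :=
        fun y hy hb => hdisj' y hy y (List.mem_cons_of_mem _ hb) rfl
      have hndab : (a ++ [pos]).Nodup := by
        rw [List.nodup_append]
        refine ⟨hnda', List.nodup_singleton _, ?_⟩
        intro y hy z hz
        simp only [List.mem_singleton] at hz
        subst hz
        exact fun h => hnda (h ▸ hy)
      have hsplit : a ++ pos :: b = (a ++ [pos]) ++ b := by simp
      have hlet : lettersOf (a ++ pos :: b)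
          = lettersOf (a ++ [pos]) ++ lettersOf (pos :: b) := by
        rw [hsplit, lettersOf_append (a ++ [pos]) b pos List.getLast?_concat]
      have hrev : (a ++ pos :: b).reverse = b.reverse ++ (pos :: a.reverse) := by
        simp
      have hposres : ((lettersOf (a ++ pos :: b)).reverse).drop b.reverse.length
          = (lettersOf (a ++ [pos])).reverse := by
        rw [hlet, List.reverse_append, List.length_reverse]
        have hL : (lettersOf (pos :: b)).reverse.length = b.length := by
          rw [List.length_reverse, length_lettersOf_cons]
        rw [← hL, List.drop_left' rfl]
      have hvis : b.reverse.foldl PySem.Set.discard (a ++ pos :: b) = a ++ [pos] := by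
        rw [foldl_discard_eq]
        rw [hsplit, List.filter_append]
        have h1 : (a ++ [pos]).filter (fun y => decide (y ∉ b.reverse)) = a ++ [pos] := by
          rw [List.filter_eq_self]
          intro y hy
          rcases List.mem_append.mp hy with h | h
          · simp [hdisj y h]
          · simp at h
            simp [h, hndb]
        have h2 : b.filter (fun y => decide (y ∉ b.reverse)) = [] := by
          rw [List.filter_eq_nil_iff]
          intro y hy
          simp [hy]
        rw [h1, h2, List.append_nil]
      have hpop : fPop pos (a ++ pos :: b).reverse (a ++ pos :: b)
            (lettersOf (a ++ pos :: b)).reverse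
          = (pos :: a.reverse, a ++ [pos], (lettersOf (a ++ [pos])).reverse) := by
        rw [hrev, fPop_eq pos b.reverse (pos :: a.reverse) _ _
          (fun q hq h => hndb (by rw [← h]; exact List.mem_reverse.mp hq)) rfl]
        rw [hvis, hposres]
      have hC : chronoRun (pos :: posSeq pos rest) (a ++ pos :: b)
          = chronoRun (posSeq pos rest) (a ++ [pos]) := by
        simp only [chronoRun, hmem, if_true]
        rw [takeWhile_bne_append pos a b hnda]
      rw [hA, hpop, hC]
      have hrevab : pos :: a.reverse = (a ++ [pos]).reverse := by simp
      rw [hrevab]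
      exact ih (a ++ [pos]) pos hpre' hndab List.getLast?_concat
    · -- new position: A pushes, the erasure pushes
      have hsc : PySem.Set.contains v pos = false := by simp [hmem]
      have hA : fLoop (m :: rest) (p1, p2) v.reverse v (lettersOf v).reverse
          = fLoop rest pos (pos :: v.reverse) (PySem.Set.add v pos)
              (m :: (lettersOf v).reverse) := by
        rw [fLoop, hmv]
        simp only [hmv1, hsc, if_false, Bool.false_eq_true]
      rw [hA]
      have hadd : PySem.Set.add v pos = v ++ [pos] := PySem.Set.add_of_not_mem hmem
      have hlet : lettersOf (v ++ [pos]) = lettersOf v ++ [m] := by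
        rw [lettersOf_append v [pos] (p1, p2) hlast]
        congr 1
        rw [lettersOf_eq]
        simp only [List.tail_cons, List.zip_cons_cons, List.zip_nil_right, List.map_cons,
          List.map_nil]
        have h1 : pos.1 - p1 = dx := by rw [hpos]; ring
        have h2 : pos.2 - p2 = dy := by rw [hpos]; ring
        rw [h1, h2, hletter]
      have hndv : (v ++ [pos]).Nodup := by
        rw [List.nodup_append]
        refine ⟨hnd, List.nodup_singleton _, ?_⟩
        intro y hy z hz
        simp only [List.mem_singleton] at hz
        subst hz
        exact fun h => hmem (h ▸ hy)
      have hC : chronoRun (pos :: posSeq pos rest) v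
          = chronoRun (posSeq pos rest) (v ++ [pos]) := by
        simp [chronoRun, hmem]
      rw [hC]
      have hrevv : pos :: v.reverse = (v ++ [pos]).reverse := by simp
      have hresv : m :: (lettersOf v).reverse = (lettersOf (v ++ [pos])).reverse := by
        rw [hlet]
        simp
      rw [hrevv, hresv, hadd]
      exact ih (v ++ [pos]) pos hpre' hndv List.getLast?_concat

-- ======== B-side characterisation ========

-- B's position-building fold appends the generated position sequence
lemma fAltBuild_eq (ms : List String) :
    ∀ (ps : List (Int × Int)) (p : Int × Int),
    (∀ m ∈ ms, m = "R" ∨ m = "D" ∨ m = "L" ∨ m = "U") →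
    ps.getLast? = some p →
    ms.foldl fAltStep ps = ps ++ posSeq p ms := by
  induction ms with
  | nil => intro ps p _ _; simp [posSeq]
  | cons m ms ih =>
    intro ps p hpre hlast
    obtain ⟨dx, dy, mv, hmv, hmvq, hdelta, hletter⟩ :=
      moveAgree m (hpre m List.mem_cons_self)
    obtain ⟨p1, p2⟩ := p
    have hstep : fAltStep ps m = ps ++ [(p1 + dx, p2 + dy)] := by
      simp [fAltStep, hdelta, pyGet_neg_one ps (p1, p2) hlast]
    rw [List.foldl_cons, hstep,
      ih (ps ++ [(p1 + dx, p2 + dy)]) (p1 + dx, p2 + dy)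
        (fun m' hm' => hpre m' (List.mem_cons_of_mem _ hm')) List.getLast?_concat]
    simp [posSeq, hdelta]

-- the last-occurrence dict: folding inserts over keys not equal to q is invisible to q
lemma lastDict_skip (B : List (Int × (Int × Int))) (q : Int × Int) :
    ∀ (d : PySem.Dict (Int × Int) Int), (∀ iv ∈ B, iv.2 ≠ q) →
    (B.foldl (fun d iv => PySem.Dict.insert d iv.2 iv.1) d).getD q 0 = d.getD q 0 := by
  induction B with
  | nil => intro d _; rfl
  | cons iv B ih =>
    intro d hB
    rw [List.foldl_cons, ih _ (fun jv hj => hB jv (List.mem_cons_of_mem _ hj)),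
      PySem.Dict.getD_insert, if_neg (Ne.symm (hB iv List.mem_cons_self))]

-- the dict {p: i for i, p in enumerate(P)} returns the LAST index of each key
lemma lastDict_getD (P c d : List (Int × Int)) (q : Int × Int)
    (hP : P = c ++ q :: d) (hq : q ∉ d) :
    ((PySem.List.enumerate P 0).foldl
      (fun d iv => PySem.Dict.insert d iv.2 iv.1) PySem.Dict.empty).getD q 0
      = (c.length : Int) := by
  subst hP
  rw [PySem.List.enumerate_append, PySem.List.enumerate_cons, List.foldl_append,
    List.foldl_cons]
  rw [lastDict_skip _ q _ ?hside]
  case hside =>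
    intro iv hiv
    rw [PySem.List.mem_enumerate_iff] at hiv
    obtain ⟨k, hk, hiv⟩ := hiv
    subst hiv
    simp only
    intro h
    exact hq (h ▸ d.getElem_mem hk)
  rw [PySem.Dict.getD_insert_self]
  simp

-- any occurrence index is at most the last-occurrence index
lemma occ_le_last (P c d : List (Int × Int)) (q : Int × Int) (i : Nat)
    (hP : P = c ++ q :: d) (hq : q ∉ d) (hPi : P[i]? = some q) :
    i ≤ c.length := by
  by_contra h
  push_neg at h
  subst hP
  rw [List.getElem?_append_right (by omega)] at hPi
  obtain ⟨k, hk⟩ : ∃ k, i - c.length = k + 1 := ⟨i - c.length - 1, by omega⟩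
  rw [hk, List.getElem?_cons_succ] at hPi
  exact hq (List.mem_of_getElem? hPi)

-- the jump loop walks the last-exit decomposition
lemma fAltJump_eq (P : List (Int × Int)) (fuel : Nat) :
    ∀ (i : Nat) (path : List (Int × Int)) (p : Int × Int),
    P.length - i < fuel → i ≤ P.length → p ∉ P.drop i →
    fAltJump P ((PySem.List.enumerate P 0).foldl
        (fun d iv => PySem.Dict.insert d iv.2 iv.1) PySem.Dict.empty)
      fuel (i : Int) path
      = path ++ (lastExit p (P.drop i)).tail := by
  induction fuel with
  | zero => intro i path p hf _ _; omega
  | succ fuel ih =>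
    intro i path p hf hile hp
    by_cases hlt : i < P.length
    · have hget : PySem.List.pyGet? P (i : Int) = some P[i] := by
        rw [PySem.List.pyGet?_natCast]
        simp [hlt]
      set q := P[i] with hq
      have hdrop : P.drop i = q :: P.drop (i + 1) := by
        rw [List.drop_eq_getElem_cons hlt]
      have hqmem : q ∈ P := List.getElem_mem hlt
      obtain ⟨c, hPeq, hnot⟩ := afterLast_split q P hqmem
      set d := afterLast q P with hd
      have hgetD : ((PySem.List.enumerate P 0).foldl
          (fun d iv => PySem.Dict.insert d iv.2 iv.1) PySem.Dict.empty).getD q 0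
          = (c.length : Int) := lastDict_getD P c d q hPeq hnot
      have hocc : i ≤ c.length := occ_le_last P c d q i hPeq hnot (List.getElem?_eq_getElem hlt)
      have hclen : c.length < P.length := by
        have := congrArg List.length hPeq
        simp at this
        omega
      have hdropc : P.drop (c.length + 1) = d := by
        rw [hPeq]
        have : c ++ q :: d = (c ++ [q]) ++ d := by simp
        rw [this, List.drop_left' (by simp)]
      have hnext : fAltJump P ((PySem.List.enumerate P 0).foldl
            (fun d iv => PySem.Dict.insert d iv.2 iv.1) PySem.Dict.empty)
          (fuel + 1) (i : Int) path
          = fAltJump P ((PySem.List.enumerate P 0).foldl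
              (fun d iv => PySem.Dict.insert d iv.2 iv.1) PySem.Dict.empty)
            fuel ((c.length + 1 : Nat) : Int) (path ++ [q]) := by
        rw [fAltJump]
        rw [if_pos (by exact_mod_cast hlt), hget]
        dsimp only
        rw [hgetD]
        norm_num
      rw [hnext, ih (c.length + 1) (path ++ [q]) q (by omega) (by omega)
        (by rw [hdropc]; exact hnot)]
      rw [hdropc]
      -- lastExit q (P.drop (i+1)) = lastExit q d
      have hLE : lastExit q (P.drop (i + 1)) = lastExit q d := by
        rcases Nat.lt_or_ge i c.length with hlt2 | hge
        · have : P.drop (i + 1) = c.drop (i + 1) ++ q :: d := by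
            rw [hPeq, List.drop_append_of_le_length (by omega)]
          rw [this, lastExit_dropPast q _ d hnot]
        · have hieq : i = c.length := by omega
          rw [hieq, hdropc]
      obtain ⟨r, hr⟩ := lastExit_head q d hnot
      have hp' : p ∉ P.drop i := hp
      rw [hdrop] at hp'
      rw [hdrop, lastExit_cons p q _ hp', List.tail_cons, hLE, hr]
      simp
    · have hieq : i = P.length := by omega
      have hdrop : P.drop i = [] := by rw [hieq, List.drop_length]
      rw [fAltJump, if_neg (by exact_mod_cast hlt), hdrop, lastExit_nil]
      simp

-- f_alt computes the letters of the last-exit decomposition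
lemma fAlt_char (arr : List String) (hpre : Pre_f arr) :
    f_alt arr = lettersOf (lastExit (0, 0) (posSeq (0, 0) arr)) := by
  have hbuild : arr.foldl fAltStep [(0, 0)] = (0, 0) :: posSeq (0, 0) arr := by
    rw [fAltBuild_eq arr [(0, 0)] (0, 0) hpre (by simp)]
    simp
  set P : List (Int × Int) := (0, 0) :: posSeq (0, 0) arr with hPdef
  have hget0 : PySem.List.pyGet? P (0 : Int) = some (0, 0) := by
    have : ((0 : Nat) : Int) = (0 : Int) := by norm_num
    rw [← this, PySem.List.pyGet?_natCast]
    simp [hPdef]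
  have h0mem : ((0, 0) : Int × Int) ∈ P := by simp [hPdef]
  obtain ⟨c0, hPeq, hnot0⟩ := afterLast_split (0, 0) P h0mem
  set d0 := afterLast (0, 0) P with hd0
  have hgetD0 : ((PySem.List.enumerate P 0).foldl
      (fun d iv => PySem.Dict.insert d iv.2 iv.1) PySem.Dict.empty).getD (0, 0) 0
      = (c0.length : Int) := lastDict_getD P c0 d0 (0, 0) hPeq hnot0
  have hc0lt : c0.length < P.length := by
    have := congrArg List.length hPeq
    simp at this
    omega
  have hdropc0 : P.drop (c0.length + 1) = d0 := by
    rw [hPeq]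
    have : c0 ++ ((0, 0) : Int × Int) :: d0 = (c0 ++ [(0, 0)]) ++ d0 := by simp
    rw [this, List.drop_left' (by simp)]
  have hjump : fAltJump P ((PySem.List.enumerate P 0).foldl
        (fun d iv => PySem.Dict.insert d iv.2 iv.1) PySem.Dict.empty)
      P.length ((c0.length : Int) + 1) [(0, 0)]
      = [((0 : Int), (0 : Int))] ++ (lastExit (0, 0) d0).tail := by
    have := fAltJump_eq P P.length (c0.length + 1) [(0, 0)] (0, 0)
      (by omega) (by omega) (by rw [hdropc0]; exact hnot0)
    rw [hdropc0] at this
    have hcast : ((c0.length + 1 : Nat) : Int) = (c0.length : Int) + 1 := by push_cast; ring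
    rw [← hcast]
    exact this
  obtain ⟨r, hr⟩ := lastExit_head (0, 0) d0 hnot0
  -- lastExit (0,0) (posSeq (0,0) arr) = lastExit (0,0) d0
  have htail : lastExit (0, 0) (posSeq (0, 0) arr) = lastExit (0, 0) d0 := by
    cases c0 with
    | nil =>
      have : posSeq (0, 0) arr = d0 := by
        have := hPeq
        rw [hPdef] at this
        simpa using this
      rw [this]
    | cons x c0' =>
      have hx : x = (0, 0) := by
        have := hPeq
        rw [hPdef] at this
        exact (List.cons_eq_cons.mp this).1.symm
      subst hx
      have hrest : posSeq (0, 0) arr = c0' ++ ((0, 0) : Int × Int) :: d0 := by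
        have := hPeq
        rw [hPdef] at this
        exact (List.cons_eq_cons.mp this).2
      rw [hrest, lastExit_dropPast _ _ _ hnot0]
  simp only [f_alt, hbuild, hget0, hgetD0]
  rw [hjump, htail, hr]
  simp only [List.tail_cons, List.singleton_append]
  rfl

-- ===== VERDICT (by name: the statement is the Claim_ definition above) =====
theorem f_spec : Claim_equal_f := by
  unfold Claim_equal_f
  intro arr _ hpre
  unfold Spec_f
  show f arr = f_alt arr
  have hA : f arr = lettersOf (chronoRun (posSeq (0, 0) arr) [(0, 0)]) := by
    have h := mainInv arr [(0, 0)] (0, 0) hpre (by simp) rfl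
    have h0 : (lettersOf [((0 : Int), (0 : Int))]).reverse = ([] : List String) := by
      rw [lettersOf_eq]; rfl
    have hset : PySem.Set.ofList [((0 : Int), (0 : Int))] = [((0 : Int), (0 : Int))] := by
      decide
    rw [f, hset]
    rw [h0] at h
    exact h
  rw [hA, chronoRun_eq_lastExit (posSeq (0, 0) arr).length _ le_rfl (0, 0),
    fAlt_char arr hpre]
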